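-- pv_equiv track=rewrite | github.com/komajun365/competitive_programming | yukicoder/1150/1170_test.py | calc_simple
-- ===== SOURCE A (Python) =====
-- class UnionFind():
--     def __init__(self, n):
--         self.n = n
--         self.parents = [-1] * n
--
--     def find(self,x):
--         if(self.parents[x] < 0):
--             return x
--         self.parents[x] = self.find(self.parents[x])
--         return self.parents[x]
--
--     def size(self, x):
--         return self.parents[ self.find(x) ] * -1
--
--     def same(self, x, y):
--         x_root = self.find(x)
--         y_root = self.find(y)
--         return (x_root == y_root)
--
--     def union(self,x,y):
--         x_root = self.find(x)
--         y_root = self.find(y)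
--         if(x_root == y_root):
--             return
--
--         if( self.parents[x_root] <= self.parents[y_root] ):
--             self.parents[x_root] += self.parents[y_root]
--             self.parents[y_root] = x_root
--         else:
--             self.parents[y_root] += self.parents[x_root]
--             self.parents[x_root] = y_root
--
--     def members(self,x):
--         root = self.find(x)
--         ret = [ i for i in range(self.n) if self.find(i) == root ]
--         return ret
--
--     def roots(self):
--         ret = [ i for i in range(self.n) if self.parents[i] < 0]
--         return ret
--
--     def group_count(self):
--         return len(self.roots())
--
--     def all_group_members(self):
--         return {r: self.members(r) for r in self.roots()}
--
-- def calc_simple(n,a,b,x):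
--     uf = UnionFind(n)
--     for i in range(n):
--         for j in range(n):
--             if(a <= abs(x[i]-x[j]) <= b):
--                 uf.union(i,j)
--
--     ans = [0] * n
--     for i in range(n):
--         ans[i] = uf.size(i)
--
--     return ans
-- ===== SOURCE B (Python) =====
-- def calc_simple(n, a, b, x):
--     # Weighted quick-find: flat label array + class sizes, relabel the
--     # smaller class on each merge (no parent forest, no recursion).
--     comp = list(range(n))
--     sz = [1] * n
--     for i in range(n):
--         for j in range(n):
--             d = abs(x[i] - x[j])
--             if a <= d <= b:
--                 ci, cj = comp[i], comp[j]
--                 if ci != cj: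
--                     if sz[cj] <= sz[ci]:
--                         big, small = ci, cj
--                     else:
--                         big, small = cj, ci
--                     sz[big] += sz[small]
--                     comp = [big if c == small else c for c in comp]
--     return [sz[comp[i]] for i in range(n)]
-- ===== Notes on version B (the rewrite author's own statement) =====
-- stated objective: alternative
-- what changed: Replaces the recursive path-compressed union-by-size parent forest (UnionFind class with find/union) by a weighted quick-find: a flat label array plus class sizes, relabelling the smaller class on each merge, with the answer read off directly as sz[comp[i]].
import Mathlib
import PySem

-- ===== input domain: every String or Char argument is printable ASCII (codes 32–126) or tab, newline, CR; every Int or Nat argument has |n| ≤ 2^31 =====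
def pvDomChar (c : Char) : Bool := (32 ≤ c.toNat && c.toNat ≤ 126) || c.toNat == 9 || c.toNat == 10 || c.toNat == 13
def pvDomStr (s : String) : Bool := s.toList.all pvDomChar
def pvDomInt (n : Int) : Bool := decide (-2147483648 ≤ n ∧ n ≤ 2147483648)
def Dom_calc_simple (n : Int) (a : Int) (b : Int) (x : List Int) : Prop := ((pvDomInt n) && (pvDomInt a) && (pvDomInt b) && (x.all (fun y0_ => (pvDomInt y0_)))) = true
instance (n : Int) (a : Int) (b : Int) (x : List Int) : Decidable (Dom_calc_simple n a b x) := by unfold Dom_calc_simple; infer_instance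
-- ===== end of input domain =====

-- B replaces A's path-compressed union-by-size forest with a weighted quick-find
-- (flat label array relabelled on merge); same nested pair loop, same tie-break,
-- so the component sizes agree exactly. Objective: alternative algorithm.

-- ===== PORT A =====
-- UnionFind.find with path compression; fuel (p.length+1) only makes the
-- recursion structural — it is proved sufficient on every reachable state.
def findA : Nat → List Int → Nat → List Int × Nat
  | 0, p, x => (p, x)
  | f+1, p, x =>
    let px := p.getD x 0
    if px < 0 then (p, x)
    else
      let r := findA f p px.toNat
      (r.1.set x (Int.ofNat r.2), r.2)

def findTop (p : List Int) (x : Nat) : List Int × Nat := findA (p.length + 1) p x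

-- UnionFind.union
def unionA (p : List Int) (i j : Nat) : List Int :=
  let f1 := findTop p i
  let f2 := findTop f1.1 j
  let p2 := f2.1
  let xr := f1.2
  let yr := f2.2
  if xr = yr then p2
  else if p2.getD xr 0 ≤ p2.getD yr 0 then
    (p2.set xr (p2.getD xr 0 + p2.getD yr 0)).set yr (Int.ofNat xr)
  else
    (p2.set yr (p2.getD yr 0 + p2.getD xr 0)).set xr (Int.ofNat yr)

-- uf.size(i) step of the answer loop: ans[i] = parents[find(i)] * -1
def sizeStepA (st : List Int × List Int) (i : Nat) : List Int × List Int :=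
  let f := findTop st.1 i
  (f.1, st.2.set i (-(f.1.getD f.2 0)))

def calc_simple (n : Int) (a : Int) (b : Int) (x : List Int) : List Int :=
  let nn := n.toNat
  let p := (List.range nn).foldl (fun p i => (List.range nn).foldl (fun p j =>
      let d := |x.getD i 0 - x.getD j 0|
      if a ≤ d ∧ d ≤ b then unionA p i j else p) p) (List.replicate nn (-1 : Int))
  let fin := (List.range nn).foldl sizeStepA (p, List.replicate nn (0 : Int))
  fin.2

-- ===== PORT B =====
-- weighted quick-find merge step (Source B inner-loop body)
def stepB (a b : Int) (x : List Int) (i j : Nat) (st : List Nat × List Int) : List Nat × List Int :=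
  let d := |x.getD i 0 - x.getD j 0|
  if a ≤ d ∧ d ≤ b then
    let ci := st.1.getD i 0
    let cj := st.1.getD j 0
    if ci ≠ cj then
      if st.2.getD cj 0 ≤ st.2.getD ci 0 then
        (st.1.map (fun c => if c = cj then ci else c), st.2.set ci (st.2.getD ci 0 + st.2.getD cj 0))
      else
        (st.1.map (fun c => if c = ci then cj else c), st.2.set cj (st.2.getD cj 0 + st.2.getD ci 0))
    else st
  else st

def calc_simple_alt (n : Int) (a : Int) (b : Int) (x : List Int) : List Int :=
  let nn := n.toNat
  let st := (List.range nn).foldl (fun st i => (List.range nn).foldl (fun st j => stepB a b x i j st) st)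
      (List.range nn, List.replicate nn (1 : Int))
  (List.range nn).map (fun i => st.2.getD (st.1.getD i 0) 0)

-- ===== PRECONDITION & SPEC =====
-- Pre_ excludes exactly the inputs where Python A raises IndexError (x shorter than n).
def Pre_calc_simple (n : Int) (a : Int) (b : Int) (x : List Int) : Prop := n ≤ (x.length : Int)
instance (n : Int) (a : Int) (b : Int) (x : List Int) : Decidable (Pre_calc_simple n a b x) := by unfold Pre_calc_simple; infer_instance
def pvWitness_calc_simple : Int × Int × Int × List Int := (3, 1, 2, [1, 2, 4])

def Spec_calc_simple (n : Int) (a : Int) (b : Int) (x : List Int) (out : List Int) : Prop := out = calc_simple_alt n a b x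
instance (n : Int) (a : Int) (b : Int) (x : List Int) (out : List Int) : Decidable (Spec_calc_simple n a b x out) := by unfold Spec_calc_simple; infer_instance

-- ===== CLAIM (what is proved, stated in full; the proofs are below) =====
def Claim_equal_calc_simple : Prop := ∀ (n : Int) (a : Int) (b : Int) (x : List Int), Dom_calc_simple n a b x → Pre_calc_simple n a b x → Spec_calc_simple n a b x (calc_simple n a b x)

-- ===== LEMMAS AND PROOFS =====

theorem pvGetD_set_self (p : List Int) (i : Nat) (v : Int) (h : i < p.length) :
    (p.set i v).getD i 0 = v := by
  simp [List.getD_eq_getElem?_getD, List.getElem?_set_self, h]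

theorem pvGetD_set_ne (p : List Int) (i j : Nat) (v : Int) (h : j ≠ i) :
    (p.set i v).getD j 0 = p.getD j 0 := by
  simp [List.getD_eq_getElem?_getD, List.getElem?_set_ne (Ne.symm h)]

theorem pvGetD_map_lt (comp : List Nat) (f : Nat → Nat) (i : Nat) (h : i < comp.length) :
    (comp.map f).getD i 0 = f (comp.getD i 0) := by
  simp [List.getD_eq_getElem?_getD, List.getElem?_map, List.getElem?_eq_getElem h,
    List.getD_eq_getElem?_getD]

theorem pvGetD_replicate {α} [Inhabited α] (n : Nat) (c d : α) (i : Nat) (h : i < n) :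
    (List.replicate n c).getD i d = c := by
  simp [List.getD_eq_getElem?_getD, List.getElem?_replicate, h]

theorem pvGetD_range (n i : Nat) (h : i < n) : (List.range n).getD i 0 = i := by
  simp [List.getD_eq_getElem?_getD, List.getElem?_range, h]

inductive RootsToL (p : List Int) : Nat → Nat → Nat → Prop
  | root (x : Nat) : p.getD x 0 < 0 → RootsToL p x x 0
  | step (x r k : Nat) : 0 ≤ p.getD x 0 → RootsToL p (p.getD x 0).toNat r k → RootsToL p x r (k + 1)

def RootsTo (p : List Int) (x r : Nat) : Prop := ∃ k, RootsToL p x r k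

theorem rootsToL_det {p : List Int} {x r r' k k' : Nat}
    (h1 : RootsToL p x r k) (h2 : RootsToL p x r' k') : r = r' ∧ k = k' := by
  induction h1 generalizing r' k' with
  | root x hx => cases h2 with
    | root => exact ⟨rfl, rfl⟩
    | step _ _ _ h0 _ => omega
  | step x r k h0 hrec ih => cases h2 with
    | root _ hx => omega
    | step _ _ k2 _ hrec2 =>
        obtain ⟨hr, hk⟩ := ih hrec2
        exact ⟨hr, by omega⟩

theorem rootsTo_det {p : List Int} {x r r' : Nat}
    (h1 : RootsTo p x r) (h2 : RootsTo p x r') : r = r' := by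
  obtain ⟨k, h1⟩ := h1; obtain ⟨k', h2⟩ := h2
  exact (rootsToL_det h1 h2).1

theorem rootsToL_root_neg {p : List Int} {x r k : Nat} (h : RootsToL p x r k) :
    p.getD r 0 < 0 := by
  induction h with
  | root _ hx => exact hx
  | step _ _ _ _ _ ih => exact ih

def EntriesOk (n : Nat) (p : List Int) : Prop :=
  p.length = n ∧ ∀ i, i < n → 0 ≤ p.getD i 0 → (p.getD i 0).toNat < n

theorem rootsToL_lt {n : Nat} {p : List Int} {x r k : Nat}
    (hE : EntriesOk n p) (hx : x < n) (h : RootsToL p x r k) : r < n := by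
  induction h with
  | root => exact hx
  | step y r k h0 hrec ih => exact ih (hE.2 y hx h0)

def chainF (p : List Int) (y : Nat) : Nat := (p.getD y 0).toNat

theorem rootsToL_iterate {p : List Int} {x r k : Nat} (h : RootsToL p x r k) :
    ∀ t, t ≤ k → RootsToL p ((chainF p)^[t] x) r (k - t) := by
  intro t
  induction t with
  | zero => intro _; simpa using h
  | succ t ih =>
      intro ht
      have h1 : RootsToL p ((chainF p)^[t] x) r (k - t) := ih (by omega)
      have hkt : k - t = (k - (t+1)) + 1 := by omega
      rw [hkt] at h1
      cases h1 with
      | step y r k2 h0 hrec =>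
          rw [Function.iterate_succ_apply']
          exact hrec

theorem rootsToL_node_lt {n : Nat} {p : List Int} {x r k : Nat}
    (hE : EntriesOk n p) (hx : x < n) (h : RootsToL p x r k) :
    ∀ t, t ≤ k → (chainF p)^[t] x < n := by
  intro t
  induction t with
  | zero => intro _; simpa using hx
  | succ t ih =>
      intro ht
      have hn : (chainF p)^[t] x < n := ih (by omega)
      have h1 := rootsToL_iterate h t (by omega)
      have hkt : k - t = (k - (t+1)) + 1 := by omega
      rw [hkt] at h1
      cases h1 with
      | step y r k2 h0 hrec =>
          rw [Function.iterate_succ_apply']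
          exact hE.2 _ hn h0

theorem chain_bound {n : Nat} {p : List Int} {x r k : Nat}
    (hE : EntriesOk n p) (hx : x < n) (h : RootsToL p x r k) : k < n := by
  have hinj : Function.Injective (fun t : Fin (k+1) => (⟨(chainF p)^[t.1] x,
      rootsToL_node_lt hE hx h t.1 (by omega)⟩ : Fin n)) := by
    intro t1 t2 heq
    have h1 := rootsToL_iterate h t1.1 (by omega)
    have h2 := rootsToL_iterate h t2.1 (by omega)
    have hnodes : (chainF p)^[t1.1] x = (chainF p)^[t2.1] x := congrArg Fin.val heq
    rw [hnodes] at h1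
    have := (rootsToL_det h1 h2).2
    have : t1.1 = t2.1 := by omega
    exact Fin.ext this
  have := Fintype.card_le_of_injective _ hinj
  simpa using this

theorem preserve_set_root {p : List Int} {x r : Nat}
    (hlen : x < p.length) (hr : p.getD r 0 < 0) (hx0 : 0 ≤ p.getD x 0)
    (hxr : RootsTo p x r) :
    ∀ y ry, RootsTo p y ry → RootsTo (p.set x (Int.ofNat r)) y ry := by
  have hxr' : x ≠ r := by intro h; rw [h] at hx0; omega
  rintro y ry ⟨k, hk⟩
  induction hk with
  | root y hy =>
      have hyx : y ≠ x := by intro h; rw [h] at hy; omega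
      exact ⟨0, RootsToL.root y (by rw [pvGetD_set_ne _ _ _ _ hyx]; exact hy)⟩
  | step y ry k h0 hrec ih =>
      by_cases hyx : y = x
      · subst hyx
        have hry : ry = r := rootsTo_det ⟨k + 1, RootsToL.step y ry k h0 hrec⟩ hxr
        subst hry
        refine ⟨1, RootsToL.step y ry 0 ?_ ?_⟩
        · rw [pvGetD_set_self _ _ _ hlen]; exact Int.natCast_nonneg ry
        · rw [pvGetD_set_self _ _ _ hlen]
          refine RootsToL.root _ ?_
          simp only [Int.ofNat_eq_natCast, Int.toNat_natCast]
          rw [pvGetD_set_ne _ _ _ _ (Ne.symm hxr')]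
          exact hr
      · obtain ⟨k', hk'⟩ := ih
        refine ⟨k' + 1, RootsToL.step y ry k' ?_ ?_⟩
        · rw [pvGetD_set_ne _ _ _ _ hyx]; exact h0
        · rw [pvGetD_set_ne _ _ _ _ hyx]; exact hk'

theorem findA_ok {n : Nat} {p : List Int} {x r k : Nat} (f : Nat)
    (hE : EntriesOk n p) (hx : x < n) (hL : RootsToL p x r k) (hf : k < f) :
    (findA f p x).2 = r ∧
    EntriesOk n (findA f p x).1 ∧
    (∀ j, p.getD j 0 < 0 → (findA f p x).1.getD j 0 = p.getD j 0) ∧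
    (∀ y ry, RootsTo p y ry → RootsTo (findA f p x).1 y ry) := by
  induction f generalizing p x r k with
  | zero => omega
  | succ f ih =>
      by_cases hpx : p.getD x 0 < 0
      · -- root case
        have hres : findA (f+1) p x = (p, x) := by
          simp only [findA]
          rw [if_pos hpx]
        cases hL with
        | root => rw [hres]; exact ⟨rfl, hE, fun j _ => rfl, fun y ry h => h⟩
        | step _ _ _ h0 _ => omega
      · rw [Int.not_lt] at hpx
        cases hL with
        | root _ h => omega
        | step _ _ k' h0 hrec =>
            have hlt : (p.getD x 0).toNat < n := hE.2 x hx hpx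
            have ihr := ih hE hlt hrec (by omega)
            set res := findA f p (p.getD x 0).toNat with hresdef
            have hres : findA (f+1) p x = (res.1.set x (Int.ofNat res.2), res.2) := by
              simp only [findA]
              rw [if_neg (by omega : ¬ p.getD x 0 < 0), ← hresdef]
            obtain ⟨ihv, ihE, ihroots, ihpres⟩ := ihr
            -- facts about res.1
            have hpr : p.getD r 0 < 0 := rootsToL_root_neg hrec
            have hp1r : res.1.getD r 0 < 0 := by rw [ihroots r hpr]; exact hpr
            have hxr : RootsTo res.1 x r :=
              ihpres x r ⟨k' + 1, RootsToL.step x r k' h0 hrec⟩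
            have hxne : x ≠ r := by intro h; rw [h] at hpx; omega
            have hp1x : 0 ≤ res.1.getD x 0 := by
              by_contra hneg
              push_neg at hneg
              have : RootsTo res.1 x x := ⟨0, RootsToL.root x hneg⟩
              exact hxne (rootsTo_det this hxr)
            have hlen : x < res.1.length := by rw [ihE.1]; exact hx
            have hrn : r < n := rootsToL_lt hE hlt hrec
            rw [hres, ihv]
            refine ⟨rfl, ⟨?_, ?_⟩, ?_, ?_⟩
            · rw [List.length_set]; exact ihE.1
            · intro i hi h0i
              by_cases hix : i = x
              · subst hix
                rw [pvGetD_set_self _ _ _ hlen]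
                simpa [Int.ofNat_eq_natCast, Int.toNat_natCast] using hrn
              · rw [pvGetD_set_ne _ _ _ _ hix] at h0i ⊢
                exact ihE.2 i hi h0i
            · intro j hj
              have hjx : j ≠ x := by intro h; rw [h] at hj; omega
              rw [pvGetD_set_ne _ _ _ _ hjx]
              exact ihroots j hj
            · intro y ry h
              rw [ihv] at *
              exact preserve_set_root hlen hp1r hp1x hxr y ry (ihpres y ry h)

theorem findTop_ok {n : Nat} {p : List Int} {x r : Nat}
    (hE : EntriesOk n p) (hx : x < n) (hL : RootsTo p x r) :
    (findTop p x).2 = r ∧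
    EntriesOk n (findTop p x).1 ∧
    (∀ j, p.getD j 0 < 0 → (findTop p x).1.getD j 0 = p.getD j 0) ∧
    (∀ y ry, RootsTo p y ry → RootsTo (findTop p x).1 y ry) := by
  obtain ⟨k, hL⟩ := hL
  have hk : k < n := chain_bound hE hx hL
  have : k < p.length + 1 := by rw [hE.1]; omega
  exact findA_ok (p.length + 1) hE hx hL this

structure DSUInv (n : Nat) (p : List Int) (comp : List Nat) (sz : List Int) : Prop where
  pE : EntriesOk n p
  clen : comp.length = n
  slen : sz.length = n
  clt : ∀ i, i < n → comp.getD i 0 < n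
  cidem : ∀ i, i < n → comp.getD (comp.getD i 0) 0 = comp.getD i 0
  croot : ∀ i, i < n → RootsTo p i (comp.getD i 0)
  rsz : ∀ r, r < n → comp.getD r 0 = r → p.getD r 0 = -(sz.getD r 0)
  spos : ∀ r, r < n → comp.getD r 0 = r → 1 ≤ sz.getD r 0

theorem findTop_inv {n : Nat} {p : List Int} {comp : List Nat} {sz : List Int} {i : Nat}
    (h : DSUInv n p comp sz) (hi : i < n) :
    (findTop p i).2 = comp.getD i 0 ∧ DSUInv n (findTop p i).1 comp sz := by
  obtain ⟨hv, hE, hroots, hpres⟩ := findTop_ok h.pE hi (h.croot i hi)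
  refine ⟨hv, ?_⟩
  have hrneg : ∀ r, r < n → comp.getD r 0 = r → p.getD r 0 < 0 := by
    intro r hr hcr
    have := h.rsz r hr hcr
    have := h.spos r hr hcr
    omega
  exact {
    pE := hE
    clen := h.clen
    slen := h.slen
    clt := h.clt
    cidem := h.cidem
    croot := fun y hy => hpres y _ (h.croot y hy)
    rsz := fun r hr hcr => by
      rw [hroots r (hrneg r hr hcr)]; exact h.rsz r hr hcr
    spos := h.spos }

theorem link_other {p : List Int} {big small y r k : Nat} {v : Int}
    (hbig : p.getD big 0 < 0) (hsmall : p.getD small 0 < 0) (hv : v < 0)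
    (hne : big ≠ small) (hblen : big < p.length) (hslen : small < p.length)
    (h : RootsToL p y r k) (hr : r ≠ small) :
    RootsTo ((p.set big v).set small (Int.ofNat big)) y r := by
  have hlen2 : small < (p.set big v).length := by rw [List.length_set]; exact hslen
  induction h with
  | root z hz =>
      have hzs : z ≠ small := hr
      refine ⟨0, RootsToL.root z ?_⟩
      rw [pvGetD_set_ne _ _ _ _ hzs]
      by_cases hzb : z = big
      · subst hzb; rw [pvGetD_set_self _ _ _ hblen]; exact hv
      · rw [pvGetD_set_ne _ _ _ _ hzb]; exact hz
  | step z rr kk h0 hrec ih =>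
      have hzb : z ≠ big := by intro h; rw [h] at h0; omega
      have hzs : z ≠ small := by intro h; rw [h] at h0; omega
      obtain ⟨k', hk'⟩ := ih hr
      refine ⟨k' + 1, RootsToL.step z rr k' ?_ ?_⟩
      · rw [pvGetD_set_ne _ _ _ _ hzs, pvGetD_set_ne _ _ _ _ hzb]; exact h0
      · rw [pvGetD_set_ne _ _ _ _ hzs, pvGetD_set_ne _ _ _ _ hzb]; exact hk'

theorem link_small {p : List Int} {big small y r k : Nat} {v : Int}
    (hbig : p.getD big 0 < 0) (hsmall : p.getD small 0 < 0) (hv : v < 0)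
    (hne : big ≠ small) (hblen : big < p.length) (hslen : small < p.length)
    (h : RootsToL p y r k) (hr : r = small) :
    RootsTo ((p.set big v).set small (Int.ofNat big)) y big := by
  have hlen2 : small < (p.set big v).length := by rw [List.length_set]; exact hslen
  induction h with
  | root z hz =>
      subst hr
      refine ⟨1, RootsToL.step z big 0 ?_ ?_⟩
      · rw [pvGetD_set_self _ _ _ hlen2]; exact Int.natCast_nonneg big
      · rw [pvGetD_set_self _ _ _ hlen2]
        simp only [Int.ofNat_eq_natCast, Int.toNat_natCast]
        refine RootsToL.root _ ?_
        rw [pvGetD_set_ne _ _ _ _ hne, pvGetD_set_self _ _ _ hblen]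
        exact hv
  | step z rr kk h0 hrec ih =>
      have hzb : z ≠ big := by intro h; rw [h] at h0; omega
      have hzs : z ≠ small := by intro h; rw [h] at h0; omega
      obtain ⟨k', hk'⟩ := ih hr
      refine ⟨k' + 1, RootsToL.step z big k' ?_ ?_⟩
      · rw [pvGetD_set_ne _ _ _ _ hzs, pvGetD_set_ne _ _ _ _ hzb]; exact h0
      · rw [pvGetD_set_ne _ _ _ _ hzs, pvGetD_set_ne _ _ _ _ hzb]; exact hk'

theorem link_inv {n : Nat} {p : List Int} {comp : List Nat} {sz : List Int} {big small : Nat}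
    (h : DSUInv n p comp sz) (hbn : big < n) (hsn : small < n)
    (hcb : comp.getD big 0 = big) (hcs : comp.getD small 0 = small) (hne : big ≠ small) :
    DSUInv n ((p.set big (p.getD big 0 + p.getD small 0)).set small (Int.ofNat big))
      (comp.map (fun c => if c = small then big else c))
      (sz.set big (sz.getD big 0 + sz.getD small 0)) := by
  have hpb : p.getD big 0 = -(sz.getD big 0) := h.rsz big hbn hcb
  have hps : p.getD small 0 = -(sz.getD small 0) := h.rsz small hsn hcs
  have hsb : 1 ≤ sz.getD big 0 := h.spos big hbn hcb
  have hss : 1 ≤ sz.getD small 0 := h.spos small hsn hcs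
  have hbig : p.getD big 0 < 0 := by omega
  have hsmall : p.getD small 0 < 0 := by omega
  have hv : p.getD big 0 + p.getD small 0 < 0 := by omega
  have hblen : big < p.length := by rw [h.pE.1]; exact hbn
  have hslen : small < p.length := by rw [h.pE.1]; exact hsn
  have hslen2 : small < (p.set big (p.getD big 0 + p.getD small 0)).length := by
    rw [List.length_set]; exact hslen
  have hsblen : big < sz.length := by rw [h.slen]; exact hbn
  have hmap : ∀ i, i < n →
      (comp.map (fun c => if c = small then big else c)).getD i 0 =
        (if comp.getD i 0 = small then big else comp.getD i 0) := by
    intro i hi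
    exact pvGetD_map_lt comp _ i (by rw [h.clen]; exact hi)
  -- only-root-fixed facts
  have hfix : ∀ r, r < n →
      (comp.map (fun c => if c = small then big else c)).getD r 0 = r →
      comp.getD r 0 = r ∧ r ≠ small ∧ comp.getD r 0 ≠ small := by
    intro r hr hc'
    rw [hmap r hr] at hc'
    by_cases hcrs : comp.getD r 0 = small
    · rw [if_pos hcrs] at hc'
      subst hc'
      rw [hcb] at hcrs
      exact absurd hcrs hne
    · rw [if_neg hcrs] at hc'
      refine ⟨hc', ?_, hcrs⟩
      intro hrs; rw [hrs, hcs] at hcrs; exact hcrs rfl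
  refine {
    pE := ⟨by simp [h.pE.1], ?_⟩
    clen := by simp [h.clen]
    slen := by simp [h.slen]
    clt := ?_
    cidem := ?_
    croot := ?_
    rsz := ?_
    spos := ?_ }
  · -- entries in range
    intro i hi h0i
    by_cases his : i = small
    · subst his
      rw [pvGetD_set_self _ _ _ hslen2] at h0i ⊢
      simpa [Int.ofNat_eq_natCast, Int.toNat_natCast] using hbn
    · rw [pvGetD_set_ne _ _ _ _ his] at h0i ⊢
      by_cases hib : i = big
      · subst hib
        rw [pvGetD_set_self _ _ _ hblen] at h0i
        omega
      · rw [pvGetD_set_ne _ _ _ _ hib] at h0i ⊢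
        exact h.pE.2 i hi h0i
  · -- clt
    intro i hi
    rw [hmap i hi]
    split
    · exact hbn
    · exact h.clt i hi
  · -- cidem
    intro i hi
    rw [hmap i hi]
    by_cases hcis : comp.getD i 0 = small
    · rw [if_pos hcis, hmap big hbn, hcb, if_neg hne]
    · rw [if_neg hcis, hmap _ (h.clt i hi), h.cidem i hi, if_neg hcis]
  · -- croot
    intro y hy
    obtain ⟨k, hk⟩ := h.croot y hy
    rw [hmap y hy]
    by_cases hcy : comp.getD y 0 = small
    · rw [if_pos hcy]
      exact link_small hbig hsmall hv hne hblen hslen hk hcy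
    · rw [if_neg hcy]
      exact link_other hbig hsmall hv hne hblen hslen hk hcy
  · -- rsz
    intro r hr hc'
    obtain ⟨hcr, hrs, _⟩ := hfix r hr hc'
    rw [pvGetD_set_ne _ _ _ _ hrs]
    by_cases hrb : r = big
    · subst hrb
      rw [pvGetD_set_self _ _ _ hblen, pvGetD_set_self sz _ _ hsblen]
      omega
    · rw [pvGetD_set_ne _ _ _ _ hrb, pvGetD_set_ne sz _ _ _ hrb]
      exact h.rsz r hr hcr
  · -- spos
    intro r hr hc'
    obtain ⟨hcr, hrs, _⟩ := hfix r hr hc'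
    by_cases hrb : r = big
    · subst hrb
      rw [pvGetD_set_self sz _ _ hsblen]
      omega
    · rw [pvGetD_set_ne sz _ _ _ hrb]
      exact h.spos r hr hcr

theorem union_couple {n : Nat} {p : List Int} {comp : List Nat} {sz : List Int} {i j : Nat}
    (h : DSUInv n p comp sz) (hi : i < n) (hj : j < n) :
    DSUInv n (unionA p i j)
      (if comp.getD i 0 = comp.getD j 0 then comp
       else if sz.getD (comp.getD j 0) 0 ≤ sz.getD (comp.getD i 0) 0 then
         comp.map (fun c => if c = comp.getD j 0 then comp.getD i 0 else c)
       else comp.map (fun c => if c = comp.getD i 0 then comp.getD j 0 else c))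
      (if comp.getD i 0 = comp.getD j 0 then sz
       else if sz.getD (comp.getD j 0) 0 ≤ sz.getD (comp.getD i 0) 0 then
         sz.set (comp.getD i 0) (sz.getD (comp.getD i 0) 0 + sz.getD (comp.getD j 0) 0)
       else sz.set (comp.getD j 0) (sz.getD (comp.getD j 0) 0 + sz.getD (comp.getD i 0) 0)) := by
  obtain ⟨hv1, h1⟩ := findTop_inv h hi
  obtain ⟨hv2, h2⟩ := findTop_inv h1 hj
  simp only [unionA]
  rw [hv1, hv2]
  have hcin : comp.getD i 0 < n := h.clt i hi
  have hcjn : comp.getD j 0 < n := h.clt j hj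
  have hci : comp.getD (comp.getD i 0) 0 = comp.getD i 0 := h.cidem i hi
  have hcj : comp.getD (comp.getD j 0) 0 = comp.getD j 0 := h.cidem j hj
  have hp2ci : (findTop (findTop p i).1 j).1.getD (comp.getD i 0) 0 = -(sz.getD (comp.getD i 0) 0) :=
    h2.rsz _ hcin hci
  have hp2cj : (findTop (findTop p i).1 j).1.getD (comp.getD j 0) 0 = -(sz.getD (comp.getD j 0) 0) :=
    h2.rsz _ hcjn hcj
  by_cases hcc : comp.getD i 0 = comp.getD j 0
  · simp only [if_pos hcc]
    exact h2
  · simp only [if_neg hcc]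
    by_cases hle : sz.getD (comp.getD j 0) 0 ≤ sz.getD (comp.getD i 0) 0
    · have hA : (findTop (findTop p i).1 j).1.getD (comp.getD i 0) 0 ≤
          (findTop (findTop p i).1 j).1.getD (comp.getD j 0) 0 := by
        rw [hp2ci, hp2cj]; omega
      simp only [if_pos hA, if_pos hle]
      exact link_inv h2 hcin hcjn hci hcj hcc
    · have hA : ¬((findTop (findTop p i).1 j).1.getD (comp.getD i 0) 0 ≤
          (findTop (findTop p i).1 j).1.getD (comp.getD j 0) 0) := by
        rw [hp2ci, hp2cj]; omega
      simp only [if_neg hA, if_neg hle]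
      exact link_inv h2 hcjn hcin hcj hci (Ne.symm hcc)

theorem step_couple {n : Nat} {aa bb : Int} {x : List Int} {p : List Int}
    {st : List Nat × List Int} {i j : Nat}
    (h : DSUInv n p st.1 st.2) (hi : i < n) (hj : j < n) :
    DSUInv n (if aa ≤ |x.getD i 0 - x.getD j 0| ∧ |x.getD i 0 - x.getD j 0| ≤ bb then unionA p i j else p)
      (stepB aa bb x i j st).1 (stepB aa bb x i j st).2 := by
  simp only [stepB]
  by_cases hd : aa ≤ |x.getD i 0 - x.getD j 0| ∧ |x.getD i 0 - x.getD j 0| ≤ bb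
  · simp only [if_pos hd]
    have hu := union_couple h hi hj
    by_cases hcc : st.1.getD i 0 = st.1.getD j 0
    · simp only [if_neg (not_not_intro hcc)]
      simp only [if_pos hcc] at hu
      exact hu
    · simp only [if_pos hcc]
      simp only [if_neg hcc] at hu
      by_cases hle : st.2.getD (st.1.getD j 0) 0 ≤ st.2.getD (st.1.getD i 0) 0
      · simp only [if_pos hle]
        simp only [if_pos hle] at hu
        exact hu
      · simp only [if_neg hle]
        simp only [if_neg hle] at hu
        exact hu
  · simp only [if_neg hd]
    exact h

theorem foldl_couple {α β γ : Type} (R : α → β → Prop) (fA : α → γ → α) (fB : β → γ → β) :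
    ∀ (l : List γ) (s : α) (t : β),
      (∀ s t c, c ∈ l → R s t → R (fA s c) (fB t c)) → R s t →
      R (l.foldl fA s) (l.foldl fB t)
  | [], s, t, _, h => by simpa using h
  | c :: l, s, t, hstep, h => by
      simp only [List.foldl_cons]
      exact foldl_couple R fA fB l _ _
        (fun s t c' hc' => hstep s t c' (List.mem_cons_of_mem _ hc'))
        (hstep s t c List.mem_cons_self h)

theorem inv_init (n : Nat) : DSUInv n (List.replicate n (-1)) (List.range n) (List.replicate n 1) := by
  refine {
    pE := ⟨by simp, ?_⟩
    clen := by simp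
    slen := by simp
    clt := ?_
    cidem := ?_
    croot := ?_
    rsz := ?_
    spos := ?_ }
  · intro i hi h0
    rw [pvGetD_replicate n _ _ i hi] at h0
    omega
  · intro i hi; rw [pvGetD_range n i hi]; exact hi
  · intro i hi; rw [pvGetD_range n i hi, pvGetD_range n i hi]
  · intro i hi
    rw [pvGetD_range n i hi]
    exact ⟨0, RootsToL.root i (by rw [pvGetD_replicate n _ _ i hi]; omega)⟩
  · intro r hr _
    rw [pvGetD_replicate n _ _ r hr, pvGetD_replicate n _ _ r hr]
  · intro r hr _
    rw [pvGetD_replicate n _ _ r hr]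

theorem phase2 {n : Nat} {comp : List Nat} {sz : List Int} :
    ∀ (l : List Nat) (p : List Int) (ans : List Int),
      (∀ i ∈ l, i < n) → DSUInv n p comp sz →
      (l.foldl sizeStepA (p, ans)).2 =
        l.foldl (fun ans i => ans.set i (sz.getD (comp.getD i 0) 0)) ans := by
  intro l
  induction l with
  | nil => intro p ans _ _; rfl
  | cons i l ih =>
      intro p ans hmem h
      have hi : i < n := hmem i List.mem_cons_self
      obtain ⟨hv, h1⟩ := findTop_inv h hi
      simp only [List.foldl_cons]
      have hval : -((findTop p i).1.getD ((findTop p i).2) 0) = sz.getD (comp.getD i 0) 0 := by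
        rw [hv, h1.rsz _ (h.clt i hi) (h.cidem i hi)]
        omega
      have hstep : sizeStepA (p, ans) i =
          ((findTop p i).1, ans.set i (sz.getD (comp.getD i 0) 0)) := by
        simp only [sizeStepA]
        rw [hval]
      rw [hstep]
      exact ih _ _ (fun y hy => hmem y (List.mem_cons_of_mem _ hy)) h1

theorem set_append_len {α : Type} (l1 l2 : List α) (v : α) :
    (l1 ++ l2).set l1.length v = l1 ++ l2.set 0 v := by
  induction l1 with
  | nil => simp
  | cons c l ih => simp [ih]

theorem setfold (n : Nat) (v : Nat → Int) :
    ∀ m, m ≤ n →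
      (List.range m).foldl (fun ans i => ans.set i (v i)) (List.replicate n 0) =
        ((List.range m).map v) ++ List.replicate (n - m) 0 := by
  intro m
  induction m with
  | zero => intro _; simp
  | succ m ih =>
      intro hm
      rw [List.range_succ, List.foldl_append, ih (by omega), List.map_append]
      have hlen : ((List.range m).map v).length = m := by simp
      have hrep : List.replicate (n - m) (0 : Int) = 0 :: List.replicate (n - (m+1)) 0 := by
        have : n - m = (n - (m+1)) + 1 := by omega
        rw [this, List.replicate_succ]
      simp only [List.foldl_cons, List.foldl_nil]
      have hsa := set_append_len (List.map v (List.range m)) (List.replicate (n - m) 0) (v m)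
      rw [hlen] at hsa
      rw [hsa, hrep]
      simp

theorem main_eq (n a b : Int) (x : List Int) : calc_simple n a b x = calc_simple_alt n a b x := by
  have hstep : ∀ (s : List Int) (t : List Nat × List Int) (i : Nat), i ∈ List.range n.toNat →
      DSUInv n.toNat s t.1 t.2 →
      DSUInv n.toNat
        ((List.range n.toNat).foldl (fun p j =>
          if a ≤ |x.getD i 0 - x.getD j 0| ∧ |x.getD i 0 - x.getD j 0| ≤ b then unionA p i j else p) s)
        ((List.range n.toNat).foldl (fun st j => stepB a b x i j st) t).1
        ((List.range n.toNat).foldl (fun st j => stepB a b x i j st) t).2 := by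
    intro s t i hi hR
    exact foldl_couple (fun p st => DSUInv n.toNat p st.1 st.2) _ _ (List.range n.toNat) s t
      (fun s' t' j hj hR' => step_couple hR' (List.mem_range.mp hi) (List.mem_range.mp hj)) hR
  have hfold := foldl_couple (fun (p : List Int) (st : List Nat × List Int) => DSUInv n.toNat p st.1 st.2)
      _ _ (List.range n.toNat) (List.replicate n.toNat (-1)) (List.range n.toNat, List.replicate n.toNat 1)
      hstep (inv_init n.toNat)
  simp only [calc_simple, calc_simple_alt]
  rw [phase2 (List.range n.toNat) _ _ (fun i hi => List.mem_range.mp hi) hfold]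
  rw [setfold n.toNat _ n.toNat (le_refl _)]
  simp

-- ===== VERDICT (by name: the statement is the Claim_ definition above) =====
theorem calc_simple_spec : Claim_equal_calc_simple := by
  intro n a b x _ _
  exact main_eq n a b x
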